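-- pv_equiv track=rewrite | github.com/Laboratorio-EDA2-2026-1/pr-ctica-6-algoritmos-bfs-dfs-yo | Intervalo.py | buscar_intervalo
-- ===== SOURCE A (Python) =====
-- def buscar_intervalo(A, q):
--     # Caso base: si el arreglo tiene un solo elemento
--     if len(A) == 1:
--         return A[0], A[0]
--
--     mid = len(A) // 2
--     izquierda = A[:mid]
--     derecha = A[mid:]
--
--     # Buscamos en ambas mitades
--     izq_min, izq_max = buscar_intervalo(izquierda, q) if len(izquierda) > 0 else (float('inf'), float('-inf'))
--     der_min, der_max = buscar_intervalo(derecha, q) if len(derecha) > 0 else (float('inf'), float('-inf'))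
--
--     # Juntamos todos los valores para revisar
--     todos = izquierda + derecha
--
--     # Buscamos el m치s cercano por debajo y por arriba de q
--     menor = None
--     mayor = None
--     for n in todos:
--         if n <= q:
--             if menor is None or q - n < q - menor:
--                 menor = n
--         if n >= q:
--             if mayor is None or n - q < mayor - q:
--                 mayor = n
--
--     return menor, mayor
-- ===== SOURCE B (Python) =====
-- def buscar_intervalo(A, q):
--     menor = None
--     mayor = None
--     for n in sorted(A):
--         if n <= q:
--             menor = n
--         if n >= q and mayor is None:
--             mayor = n
--     return menor, mayor
-- ===== Notes on version B (the rewrite author's own statement) =====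
-- stated objective: simpler
-- what changed: Replaces the divide-and-conquer recursion (whose recursive results are discarded) plus a closest-distance scan at every level with a single C-level sort followed by one sweep that keeps the last element <= q and the first element >= q.
-- intended difference: On singleton lists [x] with x != q, A's base case returns (x, x), reporting x both as closest element <= q and >= q even though only one of the two holds; B returns the intended (x, None) when x < q and (None, x) when x > q. — e.g. on buscar_intervalo([3], 5): A returns (some 3, some 3), B returns (some 3, none)
import Mathlib
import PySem

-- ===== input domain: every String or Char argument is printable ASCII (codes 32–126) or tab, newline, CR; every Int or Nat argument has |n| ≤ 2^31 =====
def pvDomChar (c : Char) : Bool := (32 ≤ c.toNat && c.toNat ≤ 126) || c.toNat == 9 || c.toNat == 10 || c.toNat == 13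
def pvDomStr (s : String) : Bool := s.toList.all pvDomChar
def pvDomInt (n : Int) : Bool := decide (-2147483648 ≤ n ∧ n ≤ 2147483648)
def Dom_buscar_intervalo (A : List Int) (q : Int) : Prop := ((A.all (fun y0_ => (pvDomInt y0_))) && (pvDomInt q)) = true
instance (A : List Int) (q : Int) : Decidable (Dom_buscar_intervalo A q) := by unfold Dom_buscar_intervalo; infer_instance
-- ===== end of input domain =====

-- B replaces A's divide-and-conquer (whose recursive results A discards) + closest-distance
-- scan by one sort and one sweep (simpler); on singleton lists [x] with x ≠ q the base case
-- of A is wrong and B differs intentionally (see D_ below).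

-- ===== PORT A =====
-- the two `if` updates of A's final for-loop, per accumulator component
def pasoMenorA (q : Int) (a : Option Int) (n : Int) : Option Int :=
  if n ≤ q then
    match a with
    | none => some n
    | some m => if q - n < q - m then some n else some m
  else a

def pasoMayorA (q : Int) (a : Option Int) (n : Int) : Option Int :=
  if n ≥ q then
    match a with
    | none => some n
    | some m => if n - q < m - q then some n else some m
  else a

def buscar_intervalo (A : List Int) (q : Int) : Option Int × Option Int :=
  if _h1 : A.length = 1 then
    (PySem.List.pyGet? A 0, PySem.List.pyGet? A 0)
  else
    let mid : Int := PySem.Int.floordiv (A.length : Int) 2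
    let izquierda := PySem.List.slice A none (some mid)
    let derecha := PySem.List.slice A (some mid) none
    -- A computes the recursive results but never uses them; the discarded
    -- (float('inf'), float('-inf')) placeholder is represented as (none, none)
    let _izq := if _hi : izquierda.length > 0 then buscar_intervalo izquierda q else (none, none)
    let _der := if _hd : derecha.length > 0 then buscar_intervalo derecha q else (none, none)
    let todos := izquierda ++ derecha
    todos.foldl (fun mm n => (pasoMenorA q mm.1 n, pasoMayorA q mm.2 n)) (none, none)
termination_by A.length
decreasing_by
  · have hmid : PySem.Int.floordiv ((A.length : Nat) : Int) 2 = ((A.length / 2 : Nat) : Int) := by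
      exact_mod_cast PySem.Int.floordiv_natCast A.length 2
    simp only [izquierda, mid, hmid, PySem.List.slice_to_natCast, List.length_take] at _hi ⊢
    omega
  · have hmid : PySem.Int.floordiv ((A.length : Nat) : Int) 2 = ((A.length / 2 : Nat) : Int) := by
      exact_mod_cast PySem.Int.floordiv_natCast A.length 2
    simp only [derecha, mid, hmid, PySem.List.slice_from_natCast, List.length_drop] at _hd ⊢
    omega

-- ===== PORT B =====
-- the two `if` updates of B's single sweep over sorted(A)
def pasoMenorB (q : Int) (a : Option Int) (n : Int) : Option Int :=
  if n ≤ q then some n else a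

def pasoMayorB (q : Int) (a : Option Int) (n : Int) : Option Int :=
  if n ≥ q ∧ a = none then some n else a

def buscar_intervalo_alt (A : List Int) (q : Int) : Option Int × Option Int :=
  (PySem.List.sorted A (fun x => x) false).foldl
    (fun mm n => (pasoMenorB q mm.1 n, pasoMayorB q mm.2 n)) (none, none)

-- ===== PRECONDITION & SPEC =====
-- On singleton lists [x] with x ≠ q, A's base case returns (x, x), reporting x both as
-- closest element ≤ q and ≥ q even though only one of the two holds; B returns the
-- intended (x, none) when x < q and (none, x) when x > q.
def D_buscar_intervalo (A : List Int) (q : Int) : Prop := A.length = 1 ∧ A.head? ≠ some q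
instance (A : List Int) (q : Int) : Decidable (D_buscar_intervalo A q) := by unfold D_buscar_intervalo; infer_instance

def Spec_buscar_intervalo (A : List Int) (q : Int) (out : Option Int × Option Int) : Prop := ¬ D_buscar_intervalo A q → out = buscar_intervalo_alt A q
instance (A : List Int) (q : Int) (out : Option Int × Option Int) : Decidable (Spec_buscar_intervalo A q out) := by unfold Spec_buscar_intervalo; infer_instance

def pvDiffWitness_buscar_intervalo : List Int × Int := ([3], 5)
def pvDiffWitnessOut_buscar_intervalo : (Option Int × Option Int) × (Option Int × Option Int) :=
  ((some 3, some 3), (some 3, none))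

-- ===== CLAIM (what is proved, stated in full; the proofs are below) =====
def Claim_unchanged_buscar_intervalo : Prop := ∀ (A : List Int) (q : Int), Dom_buscar_intervalo A q → Spec_buscar_intervalo A q (buscar_intervalo A q)
def Claim_changed_buscar_intervalo : Prop := Dom_buscar_intervalo (pvDiffWitness_buscar_intervalo.1) (pvDiffWitness_buscar_intervalo.2) ∧ D_buscar_intervalo (pvDiffWitness_buscar_intervalo.1) (pvDiffWitness_buscar_intervalo.2) ∧ buscar_intervalo (pvDiffWitness_buscar_intervalo.1) (pvDiffWitness_buscar_intervalo.2) = pvDiffWitnessOut_buscar_intervalo.1 ∧ buscar_intervalo_alt (pvDiffWitness_buscar_intervalo.1) (pvDiffWitness_buscar_intervalo.2) = pvDiffWitnessOut_buscar_intervalo.2 ∧ pvDiffWitnessOut_buscar_intervalo.1 ≠ pvDiffWitnessOut_buscar_intervalo.2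
def Claim_exact_buscar_intervalo : Prop := ∀ (A : List Int) (q : Int), Dom_buscar_intervalo A q → D_buscar_intervalo A q → buscar_intervalo A q ≠ buscar_intervalo_alt A q

-- ===== LEMMAS AND PROOFS =====

-- running max / running min over an Option accumulator
def omaxStep (a : Option Int) (n : Int) : Option Int :=
  some (match a with | none => n | some m => max m n)
def ominStep (a : Option Int) (n : Int) : Option Int :=
  some (match a with | none => n | some m => min m n)
-- "keep the last element", "keep the first element"
def lastStep (_a : Option Int) (n : Int) : Option Int := some n
def firstStep (a : Option Int) (n : Int) : Option Int := if a = none then some n else a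

-- A's menor update is a running max over the elements ≤ q
theorem foldl_pasoMenorA (q : Int) (l : List Int) (a : Option Int) :
    l.foldl (pasoMenorA q) a = (l.filter (fun n => decide (n ≤ q))).foldl omaxStep a := by
  induction l generalizing a with
  | nil => rfl
  | cons n t ih =>
    by_cases h : n ≤ q
    · have : pasoMenorA q a n = omaxStep a n := by
        cases a with
        | none => simp [pasoMenorA, omaxStep, h]
        | some m =>
          simp only [pasoMenorA, omaxStep, if_pos h]
          split_ifs with h2
          · simp [max_eq_right (by omega : m ≤ n)]
          · simp [max_eq_left (by omega : n ≤ m)]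
      simp [List.foldl_cons, h, this, ih]
    · have : pasoMenorA q a n = a := by simp [pasoMenorA, h]
      simp [List.foldl_cons, h, this, ih]

-- A's mayor update is a running min over the elements ≥ q
theorem foldl_pasoMayorA (q : Int) (l : List Int) (a : Option Int) :
    l.foldl (pasoMayorA q) a = (l.filter (fun n => decide (q ≤ n))).foldl ominStep a := by
  induction l generalizing a with
  | nil => rfl
  | cons n t ih =>
    by_cases h : q ≤ n
    · have : pasoMayorA q a n = ominStep a n := by
        cases a with
        | none => simp [pasoMayorA, ominStep, h]
        | some m =>
          simp only [pasoMayorA, ominStep, ge_iff_le, if_pos h]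
          split_ifs with h2
          · simp [min_eq_right (by omega : n ≤ m)]
          · simp [min_eq_left (by omega : m ≤ n)]
      simp [List.foldl_cons, h, this, ih]
    · have : pasoMayorA q a n = a := by simp [pasoMayorA, h]
      simp [List.foldl_cons, h, this, ih]

-- B's menor update keeps the last element ≤ q
theorem foldl_pasoMenorB (q : Int) (l : List Int) (a : Option Int) :
    l.foldl (pasoMenorB q) a = (l.filter (fun n => decide (n ≤ q))).foldl lastStep a := by
  induction l generalizing a with
  | nil => rfl
  | cons n t ih => by_cases h : n ≤ q <;> simp [List.foldl_cons, h, pasoMenorB, lastStep, ih]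

-- B's mayor update keeps the first element ≥ q
theorem foldl_pasoMayorB (q : Int) (l : List Int) (a : Option Int) :
    l.foldl (pasoMayorB q) a = (l.filter (fun n => decide (q ≤ n))).foldl firstStep a := by
  induction l generalizing a with
  | nil => rfl
  | cons n t ih =>
    by_cases h : q ≤ n
    · have : pasoMayorB q a n = firstStep a n := by
        cases a <;> simp [pasoMayorB, firstStep, h]
      simp [List.foldl_cons, h, this, ih]
    · have : pasoMayorB q a n = a := by cases a <;> simp [pasoMayorB, h]
      simp [List.foldl_cons, h, this, ih]

theorem foldl_lastStep (l : List Int) (a : Option Int) :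
    l.foldl lastStep a = l.getLast?.elim a some := by
  induction l generalizing a with
  | nil => rfl
  | cons n t ih => simp [List.foldl_cons, lastStep, ih, List.getLast?_cons]; cases t.getLast? <;> rfl

theorem foldl_firstStep (l : List Int) (a : Option Int) :
    l.foldl firstStep a = match a with | some m => some m | none => l.head? := by
  induction l generalizing a with
  | nil => cases a <;> rfl
  | cons n t ih => cases a <;> simp [List.foldl_cons, firstStep, ih]

theorem foldl_lastStep_none (l : List Int) : l.foldl lastStep none = l.getLast? := by
  rw [foldl_lastStep]; cases l.getLast? <;> rfl

theorem foldl_firstStep_none (l : List Int) : l.foldl firstStep none = l.head? := by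
  rw [foldl_firstStep]

theorem foldl_omaxStep_some (l : List Int) (m : Int) (hle : ∀ x ∈ l, m ≤ x)
    (hp : l.Pairwise (· ≤ ·)) : l.foldl omaxStep (some m) = l.getLast?.elim (some m) some := by
  induction l generalizing m with
  | nil => rfl
  | cons k t ih =>
    have hk : m ≤ k := hle k (by simp)
    have h1 : omaxStep (some m) k = some k := by simp [omaxStep, max_eq_right hk]
    rw [List.foldl_cons, h1, ih k (fun x hx => (List.pairwise_cons.mp hp).1 x hx) (List.pairwise_cons.mp hp).2]
    simp [List.getLast?_cons]; cases t.getLast? <;> rfl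

theorem foldl_omaxStep_sorted (l : List Int) (hp : l.Pairwise (· ≤ ·)) :
    l.foldl omaxStep none = l.getLast? := by
  cases l with
  | nil => rfl
  | cons n t =>
    rw [List.foldl_cons]
    have h1 : omaxStep none n = some n := rfl
    rw [h1, foldl_omaxStep_some t n (fun x hx => (List.pairwise_cons.mp hp).1 x hx) (List.pairwise_cons.mp hp).2]
    simp [List.getLast?_cons]; cases t.getLast? <;> rfl

theorem foldl_ominStep_some (l : List Int) (m : Int) (hle : ∀ x ∈ l, m ≤ x) :
    l.foldl ominStep (some m) = some m := by
  induction l generalizing m with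
  | nil => rfl
  | cons k t ih =>
    have hk : m ≤ k := hle k (by simp)
    have h1 : ominStep (some m) k = some m := by simp [ominStep, min_eq_left hk]
    rw [List.foldl_cons, h1, ih m (fun x hx => hle x (by simp [hx]))]

theorem foldl_ominStep_sorted (l : List Int) (hp : l.Pairwise (· ≤ ·)) :
    l.foldl ominStep none = l.head? := by
  cases l with
  | nil => rfl
  | cons n t =>
    rw [List.foldl_cons]
    have h1 : ominStep none n = some n := rfl
    rw [h1, foldl_ominStep_some t n (fun x hx => (List.pairwise_cons.mp hp).1 x hx)]
    rfl

theorem omaxStep_rightComm : ∀ (a : Option Int) (x y : Int),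
    omaxStep (omaxStep a x) y = omaxStep (omaxStep a y) x := by
  intro a x y; cases a <;> simp [omaxStep, max_comm, max_left_comm]

theorem ominStep_rightComm : ∀ (a : Option Int) (x y : Int),
    ominStep (ominStep a x) y = ominStep (ominStep a y) x := by
  intro a x y; cases a <;> simp [ominStep, min_comm, min_left_comm]

-- the canonical answers, as running max / running min over the filtered input
def specLe (A : List Int) (q : Int) : Option Int :=
  (A.filter (fun n => decide (n ≤ q))).foldl omaxStep none
def specGe (A : List Int) (q : Int) : Option Int :=
  (A.filter (fun n => decide (q ≤ n))).foldl ominStep none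

theorem alt_eq_spec (A : List Int) (q : Int) :
    buscar_intervalo_alt A q = (specLe A q, specGe A q) := by
  unfold buscar_intervalo_alt
  rw [PySem.List.foldl_prod_mk]
  have hs := PySem.List.sorted_pairwise A (fun x => x)
  have hperm := PySem.List.sorted_perm A (fun x => x) false
  have hLe : ((PySem.List.sorted A (fun x => x) false).filter (fun n => decide (n ≤ q))).Pairwise (· ≤ ·) :=
    List.Pairwise.filter _ hs
  have hGe : ((PySem.List.sorted A (fun x => x) false).filter (fun n => decide (q ≤ n))).Pairwise (· ≤ ·) :=
    List.Pairwise.filter _ hs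
  rw [foldl_pasoMenorB, foldl_pasoMayorB, foldl_lastStep_none, foldl_firstStep_none,
    ← foldl_omaxStep_sorted _ hLe, ← foldl_ominStep_sorted _ hGe]
  unfold specLe specGe
  simp only [Prod.mk.injEq]
  exact ⟨@List.Perm.foldl_eq _ _ omaxStep _ _ ⟨omaxStep_rightComm⟩ (List.Perm.filter _ hperm) none,
    @List.Perm.foldl_eq _ _ ominStep _ _ ⟨ominStep_rightComm⟩ (List.Perm.filter _ hperm) none⟩

theorem a_eq_spec (A : List Int) (q : Int) (h1 : ¬ A.length = 1) :
    buscar_intervalo A q = (specLe A q, specGe A q) := by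
  rw [buscar_intervalo]
  have hmid : PySem.Int.floordiv ((A.length : Nat) : Int) 2 = ((A.length / 2 : Nat) : Int) := by
    exact_mod_cast PySem.Int.floordiv_natCast A.length 2
  simp only [h1, dite_false, hmid, PySem.List.slice_to_natCast,
    PySem.List.slice_from_natCast, List.take_append_drop]
  rw [PySem.List.foldl_prod_mk, foldl_pasoMenorA, foldl_pasoMayorA]
  rfl

-- ===== VERDICT (by name: the statement is the Claim_ definition above) =====
theorem buscar_intervalo_spec : Claim_unchanged_buscar_intervalo := by
  intro A q _hdom hnd
  by_cases h1 : A.length = 1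
  · obtain ⟨x, rfl⟩ := List.length_eq_one_iff.mp h1
    have hx : x = q := by
      by_contra hne
      exact hnd ⟨by simp, by simp [hne]⟩
    subst hx
    rw [alt_eq_spec]
    simp [buscar_intervalo, PySem.List.pyGet?, PySem.List.pyIdx?, specLe, specGe,
      omaxStep, ominStep]
  · rw [a_eq_spec A q h1, alt_eq_spec]

theorem buscar_intervalo_changed : Claim_changed_buscar_intervalo := by
  unfold Claim_changed_buscar_intervalo
  refine ⟨by decide, by decide, ?_, by decide, by decide⟩
  show buscar_intervalo [3] 5 = (some 3, some 3)
  rw [buscar_intervalo]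
  norm_num [PySem.List.pyGet?, PySem.List.pyIdx?]

theorem buscar_intervalo_tight : Claim_exact_buscar_intervalo := by
  intro A q _hdom hd
  obtain ⟨h1, hne⟩ := hd
  obtain ⟨x, rfl⟩ := List.length_eq_one_iff.mp h1
  have hx : ¬ x = q := by simpa using hne
  rw [alt_eq_spec]
  have hA : buscar_intervalo [x] q = (some x, some x) := by
    simp [buscar_intervalo, PySem.List.pyGet?, PySem.List.pyIdx?]
  rw [hA]
  by_cases hle : x ≤ q
  · have hq : (decide (q ≤ x)) = false := by simp; omega
    have : specGe [x] q = none := by simp [specGe, List.filter, hq]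
    simp [this]
  · have hq : (decide (x ≤ q)) = false := by simp; omega
    have : specLe [x] q = none := by simp [specLe, List.filter, hq]
    simp [this]
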